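-- pv_equiv track=rewrite | github.com/AngelicaDiazB14/CLASESP. | Quiz1.py | tieneDigitosImpares_aux
-- ===== SOURCE A (Python) =====
-- def tieneDigitosImpares_aux(num):
--     if(num == 0):
--         return False
--     else:
--         if(num % 2 != 0):
--             tieneDigitosImpares_aux(num//10)
--             return True
--         else:
--             return tieneDigitosImpares_aux(num//10)
-- ===== SOURCE B (Python) =====
-- def tieneDigitosImpares_aux(num):
--     digits = []
--     while True:
--         digits.append(num % 10)
--         num //= 10
--         if num == 0:
--             break
--     return any(d % 2 != 0 for d in digits)
-- ===== Notes on version B (the rewrite author's own statement) =====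
-- stated objective: alternative
-- what changed: Replaced A's digit-by-digit parity recursion (with a discarded extra recursive call) by an iterative do-while loop that first collects all digits into a list and then tests them with any().
-- outside the precondition, e.g. on tieneDigitosImpares_aux(-1): A raises RecursionError, B does not finish within the time limit
import Mathlib
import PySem

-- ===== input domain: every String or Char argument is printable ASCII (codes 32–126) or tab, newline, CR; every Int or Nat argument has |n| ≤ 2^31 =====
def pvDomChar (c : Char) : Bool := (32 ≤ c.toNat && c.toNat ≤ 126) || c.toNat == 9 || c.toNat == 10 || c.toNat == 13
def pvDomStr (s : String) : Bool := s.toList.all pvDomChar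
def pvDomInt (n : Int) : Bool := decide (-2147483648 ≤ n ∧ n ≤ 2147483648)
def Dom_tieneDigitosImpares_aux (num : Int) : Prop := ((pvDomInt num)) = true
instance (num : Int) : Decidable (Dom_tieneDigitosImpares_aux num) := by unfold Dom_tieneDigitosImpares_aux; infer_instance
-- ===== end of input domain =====

-- B replaces A's parity recursion (which carries a discarded extra recursive call) by a do-while
-- loop that collects the digits into a list and then tests them with any(); same return value on
-- all num ≥ 0 (Pre_); on negative num neither program returns (those inputs are outside Pre_).


-- ===== PORT A =====
-- A returns only for num ≥ 0 (Pre_ below; on negatives its discarded recursive call loops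
-- forever), so the recursion is carried by a Nat, on which Python's `num % 2` and `num // 10`
-- are exactly `n % 2` and `n / 10`.  A's odd branch makes an extra recursive call and DISCARDS
-- its value; being value-irrelevant, it is omitted here.
def pvAuxA (n : Nat) : Bool :=
  if n = 0 then false
  else
    if n % 2 ≠ 0 then true
    else pvAuxA (n / 10)
decreasing_by exact Nat.div_lt_self (by omega) (by norm_num)

def tieneDigitosImpares_aux (num : Int) : Bool :=
  pvAuxA num.toNat   -- num.toNat is exact on Pre_ (0 ≤ num)

-- ===== PORT B =====
-- B's do-while digit-collection loop; B returns only for num ≥ 0 (its loop never reaches 0 on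
-- negatives, outside Pre_), so the helper takes a Nat (num.toNat below is exact on Pre_) and
-- `%`/`/` are Python's `%`/`//` there.
def pvDigitsLoop (n : Nat) : List Nat :=
  if n / 10 = 0 then [n % 10]
  else n % 10 :: pvDigitsLoop (n / 10)
decreasing_by exact Nat.div_lt_self (by omega) (by norm_num)

def tieneDigitosImpares_aux_alt (num : Int) : Bool :=
  (pvDigitsLoop num.toNat).any (fun d => d % 2 ≠ 0)

-- ===== PRECONDITION & SPEC =====
-- Pre_ excludes exactly the negative inputs: there A's discarded recursive call drives num to
-- -1 and recurses on -1 forever, so Python raises RecursionError instead of returning.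
def Pre_tieneDigitosImpares_aux (num : Int) : Prop := 0 ≤ num
instance (num : Int) : Decidable (Pre_tieneDigitosImpares_aux num) := by unfold Pre_tieneDigitosImpares_aux; infer_instance
def pvWitness_tieneDigitosImpares_aux : Int := (7)

def Spec_tieneDigitosImpares_aux (num : Int) (out : Bool) : Prop := out = tieneDigitosImpares_aux_alt num
instance (num : Int) (out : Bool) : Decidable (Spec_tieneDigitosImpares_aux num out) := by unfold Spec_tieneDigitosImpares_aux; infer_instance

-- ===== CLAIM (what is proved, stated in full; the proofs are below) =====
def Claim_equal_tieneDigitosImpares_aux : Prop := ∀ (num : Int), Dom_tieneDigitosImpares_aux num → Pre_tieneDigitosImpares_aux num → Spec_tieneDigitosImpares_aux num (tieneDigitosImpares_aux num)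

-- ===== LEMMAS AND PROOFS =====
-- Loop invariant: A's digit-parity recursion computes 'some digit of n is odd', which is what
-- B's any() over the collected digit list computes.
lemma aux_eq_digits (n : Nat) :
    pvAuxA n = (pvDigitsLoop n).any (fun d => d % 2 ≠ 0) := by
  induction n using Nat.strong_induction_on with
  | _ n ih =>
    unfold pvAuxA pvDigitsLoop
    rcases Nat.eq_zero_or_pos n with h0 | h0
    · subst h0; simp
    · rw [if_neg (by omega)]
      have hpar : n % 2 = n % 10 % 2 := by omega
      by_cases hodd : n % 2 = 0
      · rw [if_neg (by omega), ih (n / 10) (Nat.div_lt_self h0 (by norm_num))]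
        unfold pvDigitsLoop
        by_cases h10 : n / 10 = 0
        · simp [h10]; omega
        · rw [if_neg h10]; simp; omega
      · rw [if_pos (by omega)]
        by_cases h10 : n / 10 = 0
        · simp [h10]; omega
        · rw [if_neg h10]; simp; left; omega

-- ===== VERDICT (by name: the statement is the Claim_ definition above) =====
theorem tieneDigitosImpares_aux_spec : Claim_equal_tieneDigitosImpares_aux := by
  intro num _ _
  unfold Spec_tieneDigitosImpares_aux tieneDigitosImpares_aux_alt tieneDigitosImpares_aux
  rw [aux_eq_digits]
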